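-- pv_equiv track=rewrite | github.com/mananbhatia/requirements-elicitation-agent | scenario_generator/phase6_assemble.py | _sample_for_personality
-- ===== SOURCE A (Python) =====
-- def _sample_for_personality(char_knowledge: list, facts_per_section: int = 3) -> list:
--     """
--     Sample character knowledge facts evenly across narrative sections.
--
--     Takes up to `facts_per_section` facts from each narrative_section so that
--     personality generation is calibrated against all dimensions of the persona's
--     situation (history, team dynamics, mental model, etc.) rather than whichever
--     section Phase 3 happened to output first.
--     """
--     by_section: dict[str, list] = {}
--     for fact in char_knowledge:
--         section = fact.get("narrative_section", "uncategorized")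
--         by_section.setdefault(section, []).append(fact)
--
--     sampled = []
--     for section_facts in by_section.values():
--         sampled.extend(section_facts[:facts_per_section])
--     return sampled
-- ===== SOURCE B (Python) =====
-- def _sample_for_personality(char_knowledge: list, facts_per_section: int = 3) -> list:
--     """Sample up to facts_per_section facts from each narrative section
--     (sections in first-appearance order), by ordered distinct sections + rescans."""
--     sections = []
--     for fact in char_knowledge:
--         s = fact.get("narrative_section", "uncategorized")
--         if s not in sections:
--             sections.append(s)
--     sampled = []
--     for s in sections:
--         matching = [f for f in char_knowledge
--                     if f.get("narrative_section", "uncategorized") == s]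
--         sampled.extend(matching[:facts_per_section])
--     return sampled
-- ===== Notes on version B (the rewrite author's own statement) =====
-- stated objective: alternative
-- what changed: Replaces the single grouping pass into a dict of lists by an ordered distinct-sections pass followed by a per-section filter-and-slice rescan of the input.
import Mathlib
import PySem

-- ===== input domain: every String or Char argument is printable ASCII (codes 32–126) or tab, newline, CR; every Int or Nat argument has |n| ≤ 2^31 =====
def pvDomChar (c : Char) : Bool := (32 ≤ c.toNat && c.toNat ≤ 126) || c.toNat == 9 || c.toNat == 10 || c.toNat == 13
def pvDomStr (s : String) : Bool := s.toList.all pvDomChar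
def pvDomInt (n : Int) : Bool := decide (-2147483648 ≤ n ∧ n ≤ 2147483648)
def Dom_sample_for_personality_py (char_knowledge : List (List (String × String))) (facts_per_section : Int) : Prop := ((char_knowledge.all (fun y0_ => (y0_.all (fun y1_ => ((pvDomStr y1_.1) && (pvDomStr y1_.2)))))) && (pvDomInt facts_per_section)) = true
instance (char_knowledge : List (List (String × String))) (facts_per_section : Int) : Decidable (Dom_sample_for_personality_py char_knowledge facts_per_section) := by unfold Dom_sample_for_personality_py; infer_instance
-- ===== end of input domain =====

-- B replaces A's single grouping pass (dict of lists) by an ordered distinct-sections pass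
-- followed by a per-section filter-and-slice rescan of the input; not faster, just a different shape.

-- fact.get("narrative_section", "uncategorized")  (shared by both ports: the same dict lookup)
def pvSec (f : List (String × String)) : String :=
  (PySem.Dict.mk f).getD "narrative_section" "uncategorized"

-- ===== PORT A =====
def sample_for_personality_py (char_knowledge : List (List (String × String))) (facts_per_section : Int) : List (List (String × String)) :=
  let by_section : PySem.Dict String (List (List (String × String))) :=
    char_knowledge.foldl (fun d fact => d.modify (pvSec fact) [] (· ++ [fact])) PySem.Dict.empty
  by_section.values.foldl
    (fun sampled section_facts => sampled ++ PySem.List.slice section_facts none (some facts_per_section)) []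

-- ===== PORT B =====
def sample_for_personality_py_alt (char_knowledge : List (List (String × String))) (facts_per_section : Int) : List (List (String × String)) :=
  let sections : List String :=
    char_knowledge.foldl (fun acc fact => if pvSec fact ∈ acc then acc else acc ++ [pvSec fact]) []
  sections.foldl
    (fun sampled s =>
      sampled ++ PySem.List.slice (char_knowledge.filter (fun f => pvSec f == s)) none (some facts_per_section)) []

-- ===== PRECONDITION & SPEC =====
def Spec_sample_for_personality_py (char_knowledge : List (List (String × String))) (facts_per_section : Int) (out : List (List (String × String))) : Prop := out = sample_for_personality_py_alt char_knowledge facts_per_section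
instance (char_knowledge : List (List (String × String))) (facts_per_section : Int) (out : List (List (String × String))) : Decidable (Spec_sample_for_personality_py char_knowledge facts_per_section out) := by unfold Spec_sample_for_personality_py; infer_instance

-- ===== CLAIM (what is proved, stated in full; the proofs are below) =====
def Claim_equal_sample_for_personality_py : Prop := ∀ (char_knowledge : List (List (String × String))) (facts_per_section : Int), Dom_sample_for_personality_py char_knowledge facts_per_section → Spec_sample_for_personality_py char_knowledge facts_per_section (sample_for_personality_py char_knowledge facts_per_section)

-- ===== LEMMAS AND PROOFS =====

-- A's grouping dict, named for the lemmas below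
def pvGroup (ck : List (List (String × String))) : PySem.Dict String (List (List (String × String))) :=
  ck.foldl (fun d fact => d.modify (pvSec fact) [] (· ++ [fact])) PySem.Dict.empty

lemma pvGroup_keys (ck : List (List (String × String))) :
    (pvGroup ck).keys = PySem.Set.ofList (ck.map pvSec) := by
  unfold pvGroup
  rw [PySem.Dict.keys_foldl_modify_key]
  simp [PySem.Set.update_nil_left]

lemma pvGroup_keys_nodup (ck : List (List (String × String))) : (pvGroup ck).keys.Nodup := by
  rw [pvGroup_keys]; exact PySem.Set.nodup_ofList _

lemma pvGroup_getD (ck : List (List (String × String))) (s : String) :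
    (pvGroup ck).getD s [] = ck.filter (fun f => pvSec f == s) := by
  unfold pvGroup
  rw [show ck.foldl (fun d fact => d.modify (pvSec fact) [] (· ++ [fact])) PySem.Dict.empty
        = (ck.map (fun f => (pvSec f, f))).foldl (fun d p => d.modify p.1 [] (· ++ [p.2])) PySem.Dict.empty
      from (List.foldl_map (f := fun f => (pvSec f, f))
        (g := fun (d : PySem.Dict String (List (List (String × String)))) p => d.modify p.1 [] (· ++ [p.2]))).symm]
  rw [PySem.Dict.getD_foldl_modify_append]
  simp [List.filter_map, Function.comp_def]

lemma pvGroup_values (ck : List (List (String × String))) :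
    (pvGroup ck).values =
      (PySem.Set.ofList (ck.map pvSec)).map (fun s => ck.filter (fun f => pvSec f == s)) := by
  rw [PySem.Dict.values_eq_map_keys (pvGroup ck) (pvGroup_keys_nodup ck) []]
  rw [pvGroup_keys]
  exact List.map_congr_left (fun s _ => pvGroup_getD ck s)

lemma pvSections_eq (ck : List (List (String × String))) :
    ck.foldl (fun acc fact => if pvSec fact ∈ acc then acc else acc ++ [pvSec fact]) []
      = PySem.Set.ofList (ck.map pvSec) := by
  have h : List.foldl (fun acc fact => if pvSec fact ∈ acc then acc else acc ++ [pvSec fact]) [] ck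
      = List.foldl (fun acc fact => PySem.Set.add acc (pvSec fact)) [] ck := by
    apply PySem.List.foldl_congr_mem
    intro acc f _
    rw [PySem.Set.add_eq_ite]
  rw [h, ← PySem.Set.update_map_eq_foldl_add, PySem.Set.update_nil_left]

-- ===== VERDICT (by name: the statement is the Claim_ definition above) =====
theorem sample_for_personality_py_spec : Claim_equal_sample_for_personality_py := by
  intro ck fps _
  unfold Spec_sample_for_personality_py sample_for_personality_py sample_for_personality_py_alt
  show ((pvGroup ck).values).foldl _ [] = _
  rw [pvSections_eq, pvGroup_values]
  rw [PySem.List.foldl_append_eq_flatMap, PySem.List.foldl_append_eq_flatMap]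
  simp [List.flatMap_map]
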